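-- pv_equiv track=rewrite | github.com/pypi-data/pypi-mirror-385 | packages/textfun/textfun-0.1.0-py3-none-any.whl/textfun/funciones.py | vocales_por_numeros
-- ===== SOURCE A (Python) =====
-- def vocales_por_numeros(texto):
--     '''Cambia las vocales por números parecidos'''
--     resultado = ""
--     texto = texto.upper()
--     for letra in texto:
--         match letra:
--             case 'A':
--                 resultado += '4'
--             case 'E':
--                 resultado += '3'
--             case 'I':
--                 resultado += '1'
--             case 'O':
--                 resultado += '0'
--             case _:
--                 resultado += letra
--     return resultado
-- ===== SOURCE B (Python) =====
-- def vocales_por_numeros(texto):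
--     '''Cambia las vocales por números parecidos'''
--     resultado = texto.upper()
--     for vocal, digito in (('A', '4'), ('E', '3'), ('I', '1'), ('O', '0')):
--         resultado = resultado.replace(vocal, digito)
--     return resultado
-- ===== Notes on version B (the rewrite author's own statement) =====
-- stated objective: faster
-- what changed: Replaced A's single per-character loop with match statement and repeated string concatenation by four staged whole-string str.replace passes, one per vowel; correct because the substituted digits are never vowels, so later passes cannot touch earlier substitutions.
import Mathlib
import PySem

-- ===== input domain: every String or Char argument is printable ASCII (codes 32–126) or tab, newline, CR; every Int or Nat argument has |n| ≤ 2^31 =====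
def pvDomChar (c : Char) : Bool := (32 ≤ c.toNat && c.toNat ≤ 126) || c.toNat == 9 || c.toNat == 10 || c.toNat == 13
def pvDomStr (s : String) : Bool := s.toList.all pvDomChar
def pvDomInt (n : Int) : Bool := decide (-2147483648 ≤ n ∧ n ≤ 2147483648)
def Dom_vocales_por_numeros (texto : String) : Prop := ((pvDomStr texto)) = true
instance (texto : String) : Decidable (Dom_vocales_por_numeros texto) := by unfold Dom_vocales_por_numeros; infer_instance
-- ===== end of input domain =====

-- B uppercases once and then runs four staged whole-string replace passes (one per vowel)
-- instead of A's single per-character loop with a match and string concatenation (measured faster at large sizes;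
-- correct because the substituted digits are never vowels, so later passes cannot touch earlier ones).

-- ===== PORT A =====
-- one loop step of A: the match on letra, appending to the accumulator resultado
def vpnStep (resultado : List Char) (letra : Char) : List Char :=
  match letra with
  | 'A' => resultado ++ ['4']
  | 'E' => resultado ++ ['3']
  | 'I' => resultado ++ ['1']
  | 'O' => resultado ++ ['0']
  | _   => resultado ++ [letra]

def vocales_por_numeros (texto : String) : String :=
  String.ofList ((PySem.Str.upper texto).toList.foldl vpnStep [])

-- ===== PORT B =====
-- the staged substitution pairs, folded with resultado.replace(vocal, digito)
def vpnPairs : List (String × String) := [("A", "4"), ("E", "3"), ("I", "1"), ("O", "0")]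

def vocales_por_numeros_alt (texto : String) : String :=
  vpnPairs.foldl (fun resultado p => PySem.Str.replace resultado p.1 p.2) (PySem.Str.upper texto)

-- ===== PRECONDITION & SPEC =====
def Spec_vocales_por_numeros (texto : String) (out : String) : Prop := out = vocales_por_numeros_alt texto
instance (texto : String) (out : String) : Decidable (Spec_vocales_por_numeros texto out) := by unfold Spec_vocales_por_numeros; infer_instance

-- ===== CLAIM (what is proved, stated in full; the proofs are below) =====
def Claim_equal_vocales_por_numeros : Prop := ∀ (texto : String), Dom_vocales_por_numeros texto → Spec_vocales_por_numeros texto (vocales_por_numeros texto)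

-- ===== LEMMAS AND PROOFS =====

-- replace with a single-character pattern and single-character replacement is a map
theorem replace_go_single (a b : Char) :
    ∀ (fuel : Nat) (l acc : List Char), l.length ≤ fuel →
      PySem.Chars.replace.go [a] [b] fuel l acc
        = acc.reverse ++ l.map (fun c => if c = a then b else c) := by
  intro fuel
  induction fuel with
  | zero =>
    intro l acc h
    have : l = [] := List.length_eq_zero_iff.mp (Nat.le_zero.mp h)
    subst this
    simp [PySem.Chars.replace.go]
  | succ n ih =>
    intro l acc h
    cases l with
    | nil => simp [PySem.Chars.replace.go]
    | cons c t =>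
      simp only [PySem.Chars.replace.go]
      by_cases hc : c = a
      · subst hc
        have hp : List.isPrefixOf [c] (c :: t) = true := by
          simp [List.isPrefixOf]
        rw [if_pos hp]
        have := ih t ([b] ++ acc) (by simpa using Nat.le_of_succ_le_succ h)
        simpa using this
      · have hp : List.isPrefixOf [a] (c :: t) = false := by
          simp [List.isPrefixOf]; exact fun h' => absurd h'.symm hc
        rw [if_neg (by simp [hp])]
        have := ih t (c :: acc) (by simpa using Nat.le_of_succ_le_succ h)
        simpa [hc] using this

theorem replace_single (a b : Char) (l : List Char) :
    PySem.Chars.replace l [a] [b] = l.map (fun c => if c = a then b else c) := by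
  simp only [PySem.Chars.replace, List.isEmpty]
  rw [if_neg (by simp)]
  simpa using replace_go_single a b l.length l [] (Nat.le_refl _)

-- A's loop is a map
theorem vpn_foldl (l : List Char) (acc : List Char) :
    l.foldl vpnStep acc = acc ++ l.map (fun c =>
      if c = 'A' then '4' else if c = 'E' then '3' else if c = 'I' then '1'
      else if c = 'O' then '0' else c) := by
  induction l generalizing acc with
  | nil => simp
  | cons c l ih =>
    simp only [List.foldl_cons, List.map_cons, ih]
    have : vpnStep acc c = acc ++ [if c = 'A' then '4' else if c = 'E' then '3'
        else if c = 'I' then '1' else if c = 'O' then '0' else c] := by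
      unfold vpnStep
      split <;> simp_all
    rw [this]; simp

theorem vpn_maps_eq (l : List Char) :
    ((((l.map (fun c => if c = 'A' then '4' else c)).map (fun c => if c = 'E' then '3' else c)).map
        (fun c => if c = 'I' then '1' else c)).map (fun c => if c = 'O' then '0' else c))
      = l.map (fun c =>
          if c = 'A' then '4' else if c = 'E' then '3' else if c = 'I' then '1'
          else if c = 'O' then '0' else c) := by
  simp only [List.map_map]
  apply List.map_congr_left
  intro c _
  by_cases h1 : c = 'A' <;> by_cases h2 : c = 'E' <;> by_cases h3 : c = 'I' <;>
    by_cases h4 : c = 'O' <;> simp_all [Function.comp]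

-- ===== VERDICT (by name: the statement is the Claim_ definition above) =====
theorem vocales_por_numeros_spec : Claim_equal_vocales_por_numeros := by
  intro texto _
  unfold Spec_vocales_por_numeros vocales_por_numeros vocales_por_numeros_alt vpnPairs
  simp only [List.foldl_cons, List.foldl_nil, PySem.Str.replace]
  rw [vpn_foldl]
  simp only [List.nil_append, String.toList_ofList]
  rw [show ("A" : String).toList = ['A'] from rfl, show ("4" : String).toList = ['4'] from rfl,
     show ("E" : String).toList = ['E'] from rfl, show ("3" : String).toList = ['3'] from rfl,
     show ("I" : String).toList = ['I'] from rfl, show ("1" : String).toList = ['1'] from rfl,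
     show ("O" : String).toList = ['O'] from rfl, show ("0" : String).toList = ['0'] from rfl]
  rw [replace_single, replace_single, replace_single, replace_single, vpn_maps_eq]
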